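-- pv_equiv track=rewrite | github.com/icacedo/splicing | gff_analysis/isosort_lib.py | make_frame_sym
-- ===== SOURCE A (Python) =====
-- def make_frame_sym(sym_seq_wb):
--
-- 	c = 1
-- 	frame = []
-- 	for s in sym_seq_wb:
-- 		if s == '#':
-- 			frame.append('#')
-- 		if s == '*':
-- 			frame.append(c)
-- 			c += 1
-- 		if s == '-':
-- 			frame.append('-')
--
-- 	frame2 = ''
-- 	for s in frame:
-- 		if type(s) == int:
-- 			if s%3 == 1: frame2 += '1'
-- 			if s%3 == 2: frame2 += '2'
-- 			if s%3 == 0: frame2 += '3'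
-- 		else:
-- 			frame2 += s
--
-- 	return frame2
-- ===== SOURCE B (Python) =====
-- def make_frame_sym(sym_seq_wb):
--     c = 1
--     out = []
--     for s in sym_seq_wb:
--         if s == '#':
--             out.append('#')
--         elif s == '*':
--             out.append(str((c - 1) % 3 + 1))
--             c += 1
--         elif s == '-':
--             out.append('-')
--     return ''.join(out)
-- ===== Notes on version B (the rewrite author's own statement) =====
-- stated objective: simpler
-- what changed: One pass over the input with a counter and a closed-form digit str((c-1)%3+1), joined at the end, instead of A's two passes through an intermediate mixed int/str list with a three-branch mod transcoding.
import Mathlib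
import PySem

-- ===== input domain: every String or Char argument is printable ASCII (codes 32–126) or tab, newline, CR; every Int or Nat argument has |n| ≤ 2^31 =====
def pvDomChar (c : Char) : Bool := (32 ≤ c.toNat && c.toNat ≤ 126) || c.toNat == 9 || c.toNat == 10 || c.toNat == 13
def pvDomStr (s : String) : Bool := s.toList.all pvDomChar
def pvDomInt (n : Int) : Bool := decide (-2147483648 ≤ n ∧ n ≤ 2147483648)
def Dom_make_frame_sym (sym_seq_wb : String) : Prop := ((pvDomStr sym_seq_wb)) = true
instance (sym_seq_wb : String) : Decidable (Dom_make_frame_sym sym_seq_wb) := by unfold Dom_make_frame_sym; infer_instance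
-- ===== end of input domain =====

-- B replaces A's two passes (build a mixed int/str list, then transcode it) by one pass with a
-- counter and the closed-form digit str((c-1)%3+1), joined at the end; objective: simpler.

-- ===== PORT A =====
-- frame is a Python list holding ints ('*'-positions) and the strings '#'/'-': List (Int ⊕ Char)
def mfsA_step (st : Int × List (Int ⊕ Char)) (s : Char) : Int × List (Int ⊕ Char) :=
  let st1 := if s = '#' then (st.1, st.2 ++ [Sum.inr '#']) else st
  let st2 := if s = '*' then (st1.1 + 1, st1.2 ++ [Sum.inl st1.1]) else st1
  if s = '-' then (st2.1, st2.2 ++ [Sum.inr '-']) else st2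

-- what the second loop appends to frame2 for one element of frame (the three sequential ifs / else)
def mfsA_item (x : Int ⊕ Char) : List Char :=
  match x with
  | Sum.inl n =>
      (if PySem.Int.mod n 3 = 1 then ['1'] else []) ++
      (if PySem.Int.mod n 3 = 2 then ['2'] else []) ++
      (if PySem.Int.mod n 3 = 0 then ['3'] else [])
  | Sum.inr ch => [ch]

-- string concatenation 'frame2 += …' is ported exactly as append on List Char
def make_frame_sym (sym_seq_wb : String) : String :=
  String.ofList (((sym_seq_wb.toList.foldl mfsA_step (1, [])).2).foldl
    (fun acc x => acc ++ mfsA_item x) [])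

-- ===== PORT B =====
def mfsB_step (st : Int × List (List Char)) (ch : Char) : Int × List (List Char) :=
  if ch = '#' then (st.1, st.2 ++ [['#']])
  else if ch = '*' then (st.1 + 1, st.2 ++ [PySem.Int.toChars (PySem.Int.mod (st.1 - 1) 3 + 1)])
  else if ch = '-' then (st.1, st.2 ++ [['-']])
  else st

def make_frame_sym_alt (sym_seq_wb : String) : String :=
  String.ofList (PySem.Chars.join [] (sym_seq_wb.toList.foldl mfsB_step (1, [])).2)

-- ===== PRECONDITION & SPEC =====
def Spec_make_frame_sym (sym_seq_wb : String) (out : String) : Prop := out = make_frame_sym_alt sym_seq_wb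
instance (sym_seq_wb : String) (out : String) : Decidable (Spec_make_frame_sym sym_seq_wb out) := by unfold Spec_make_frame_sym; infer_instance

-- ===== CLAIM (what is proved, stated in full; the proofs are below) =====
def Claim_equal_make_frame_sym : Prop := ∀ (sym_seq_wb : String), Dom_make_frame_sym sym_seq_wb → Spec_make_frame_sym sym_seq_wb (make_frame_sym sym_seq_wb)

-- ===== LEMMAS AND PROOFS =====

-- ''.join over List Char pieces is flatten
lemma join_nil_eq_flatten (ps : List (List Char)) : PySem.Chars.join [] ps = ps.flatten := by
  show List.intercalate [] ps = ps.flatten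
  induction ps with
  | nil => rfl
  | cons h t ih => cases t <;> simp_all [List.intercalate, List.intersperse]

-- A's three-branch transcoding of the counter value equals B's closed-form digit
lemma item_eq_digit (c : Int) :
    mfsA_item (Sum.inl c) = PySem.Int.toChars (PySem.Int.mod (c - 1) 3 + 1) := by
  simp only [mfsA_item, PySem.Int.mod_eq_emod_of_pos (by norm_num : (0:Int) < 3)]
  have h : c % 3 = 0 ∨ c % 3 = 1 ∨ c % 3 = 2 := by omega
  rcases h with h | h | h
  · rw [h, show (c - 1) % 3 = 2 from by omega]; decide
  · rw [h, show (c - 1) % 3 = 0 from by omega]; decide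
  · rw [h, show (c - 1) % 3 = 1 from by omega]; decide

-- the single invariant: equal counters, and A's transcoded frame = B's joined pieces
lemma fold_rel (l : List Char) : ∀ (c : Int) (fr : List (Int ⊕ Char)) (out : List (List Char)),
    fr.flatMap mfsA_item = out.flatten →
    (l.foldl mfsA_step (c, fr)).1 = (l.foldl mfsB_step (c, out)).1 ∧
    ((l.foldl mfsA_step (c, fr)).2).flatMap mfsA_item = ((l.foldl mfsB_step (c, out)).2).flatten := by
  induction l with
  | nil => intro c fr out h; exact ⟨rfl, h⟩
  | cons ch t ih =>
    intro c fr out h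
    simp only [List.foldl_cons]
    by_cases h1 : ch = '#'
    · subst h1
      rw [show mfsA_step (c, fr) '#' = (c, fr ++ [Sum.inr '#']) from by simp [mfsA_step],
          show mfsB_step (c, out) '#' = (c, out ++ [['#']]) from by simp [mfsB_step]]
      exact ih _ _ _ (by simp [h, mfsA_item])
    · by_cases h2 : ch = '*'
      · subst h2
        rw [show mfsA_step (c, fr) '*' = (c + 1, fr ++ [Sum.inl c]) from by simp [mfsA_step],
            show mfsB_step (c, out) '*' =
              (c + 1, out ++ [PySem.Int.toChars (PySem.Int.mod (c - 1) 3 + 1)]) from by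
              simp [mfsB_step]]
        exact ih _ _ _ (by simp [h, item_eq_digit])
      · by_cases h3 : ch = '-'
        · subst h3
          rw [show mfsA_step (c, fr) '-' = (c, fr ++ [Sum.inr '-']) from by simp [mfsA_step],
              show mfsB_step (c, out) '-' = (c, out ++ [['-']]) from by simp [mfsB_step]]
          exact ih _ _ _ (by simp [h, mfsA_item])
        · rw [show mfsA_step (c, fr) ch = (c, fr) from by simp [mfsA_step, h1, h2, h3],
              show mfsB_step (c, out) ch = (c, out) from by simp [mfsB_step, h1, h2, h3]]
          exact ih _ _ _ h

-- ===== VERDICT (by name: the statement is the Claim_ definition above) =====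
theorem make_frame_sym_spec : Claim_equal_make_frame_sym := by
  intro s _
  unfold Spec_make_frame_sym make_frame_sym make_frame_sym_alt
  rw [PySem.List.foldl_append_eq_flatMap, join_nil_eq_flatten]
  exact congrArg String.ofList (by simpa using (fold_rel s.toList 1 [] [] rfl).2)
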